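-- pv_equiv track=rewrite | github.com/0xspringtime/leetcode | 2125n.py | laser_beams
-- ===== SOURCE A (Python) =====
-- def laser_beams(bank):
--     # Convert strings to lists of indices of '1's
--     rows = [[i for i, x in enumerate(row) if x == '1'] for row in bank]
--
--     # Initialize total count of beams
--     total_beams = 0
--
--     # Iterate over all pairs of rows
--     for i in range(len(rows)):
--         for j in range(i + 1, len(rows)):
--             # Check if there is no security device in between
--             if all(not rows[k] for k in range(i + 1, j)):
--                 # Add the number of beams between the two rows
--                 total_beams += len(rows[i]) * len(rows[j])
--
--     return total_beams
-- ===== SOURCE B (Python) =====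
-- def laser_beams(bank):
--     total = 0
--     prev = 0
--     for row in bank:
--         c = row.count('1')
--         if c:
--             total += prev * c
--             prev = c
--     return total
-- ===== Notes on version B (the rewrite author's own statement) =====
-- stated objective: faster
-- what changed: Replaced the all-pairs double loop with its per-pair emptiness rescans by a single pass that multiplies the '1'-count of each non-empty row with the previous non-empty row's count.
import Mathlib
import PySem

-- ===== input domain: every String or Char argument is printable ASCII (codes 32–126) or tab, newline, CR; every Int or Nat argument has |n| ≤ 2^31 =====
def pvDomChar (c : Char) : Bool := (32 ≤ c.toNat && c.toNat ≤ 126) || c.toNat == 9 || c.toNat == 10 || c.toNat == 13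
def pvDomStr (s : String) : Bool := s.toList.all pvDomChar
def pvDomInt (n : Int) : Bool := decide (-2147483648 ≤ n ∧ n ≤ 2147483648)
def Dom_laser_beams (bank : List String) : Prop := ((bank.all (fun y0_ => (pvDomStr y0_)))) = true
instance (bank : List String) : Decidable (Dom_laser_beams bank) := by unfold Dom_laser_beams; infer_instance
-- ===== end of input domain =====

-- B replaces A's all-pairs double loop (with a rescan of the gap rows for every pair) by one
-- left-to-right pass multiplying the '1'-counts of consecutive non-empty rows (objective: faster).

-- ===== PORT A =====
def laser_beams (bank : List String) : Int :=
  let rows : List (List Int) :=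
    bank.map (fun row =>
      (PySem.List.enumerate row.toList).foldl
        (fun acc p => if p.2 == '1' then acc ++ [p.1] else acc) [])
  (PySem.List.pyRange 0 (rows.length : Int) 1).foldl (fun total i =>
    (PySem.List.pyRange (i + 1) (rows.length : Int) 1).foldl (fun total j =>
      if (PySem.List.pyRange (i + 1) j 1).all
           (fun k => (PySem.List.pyGetD rows k ([] : List Int)).isEmpty) then
        total + ((PySem.List.pyGetD rows i ([] : List Int)).length : Int)
              * ((PySem.List.pyGetD rows j ([] : List Int)).length : Int)
      else total) total) 0

-- ===== PORT B =====
def laser_beams_alt (bank : List String) : Int :=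
  (bank.foldl (fun (st : Int × Int) row =>
      let c : Int := (PySem.Str.count row "1" : Int)
      if c ≠ 0 then (st.1 + st.2 * c, c) else st)
    ((0 : Int), (0 : Int))).1

-- ===== PRECONDITION & SPEC =====
def Spec_laser_beams (bank : List String) (out : Int) : Prop := out = laser_beams_alt bank
instance (bank : List String) (out : Int) : Decidable (Spec_laser_beams bank out) := by unfold Spec_laser_beams; infer_instance

-- ===== CLAIM (what is proved, stated in full; the proofs are below) =====
def Claim_equal_laser_beams : Prop := ∀ (bank : List String), Dom_laser_beams bank → Spec_laser_beams bank (laser_beams bank)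

-- ===== LEMMAS AND PROOFS =====

-- first non-zero entry of a list of counts (0 if none)
def pvFirstNz : List Int → Int
  | [] => 0
  | c :: cs => if c = 0 then pvFirstNz cs else c

-- the beam total as a function of the per-row counts
def pvSum : List Int → Int
  | [] => 0
  | c :: cs => c * pvFirstNz cs + pvSum cs

-- Str.count for the single character "1" is List.count on the characters
theorem pv_go1 (fuel : Nat) (l : List Char) (acc : Nat) (h : l.length ≤ fuel) :
    PySem.Chars.count.go ['1'] fuel l acc = acc + l.count '1' := by
  induction fuel generalizing l acc with
  | zero =>
    rw [PySem.Chars.count.go.eq_def]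
    have : l = [] := List.eq_nil_of_length_eq_zero (Nat.le_zero.mp h)
    subst this; simp
  | succ n ih =>
    rw [PySem.Chars.count.go.eq_def]
    cases l with
    | nil => simp
    | cons c t =>
      simp only [List.length_cons] at h
      by_cases hc : c = '1'
      · subst hc
        simp [List.isPrefixOf, ih t (acc+1) (by omega)]
        omega
      · have hc' : ¬ ('1' = c) := fun h' => hc h'.symm
        simp [List.isPrefixOf, hc', ih t acc (by omega), hc]

theorem pv_cnt1 (s : String) : PySem.Str.count s "1" = s.toList.count '1' := by
  rw [PySem.Str.count_eq]
  show PySem.Chars.count s.toList ['1'] = _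
  unfold PySem.Chars.count
  simp only [List.isEmpty_cons, Bool.false_eq_true, if_false]
  rw [pv_go1 s.toList.length s.toList 0 (le_refl _)]
  simp

-- B's fold computes pvSum
theorem pv_Bfold (cs : List Int) (t p : Int) :
    (cs.foldl (fun (st : Int × Int) c => if c ≠ 0 then (st.1 + st.2 * c, c) else st) (t, p)).1
      = t + p * pvFirstNz cs + pvSum cs := by
  induction cs generalizing t p with
  | nil => simp [pvFirstNz, pvSum]
  | cons c cs ih =>
    by_cases hc : c = 0
    · subst hc
      simp only [List.foldl_cons, if_neg (by simp : ¬ ((0:Int) ≠ 0)), ih]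
      simp [pvFirstNz, pvSum]
    · simp only [List.foldl_cons, if_pos hc, ih, pvFirstNz, pvSum, if_neg hc]
      ring

-- inner loop of A over cs (the per-row counts)
theorem pv_inner (cs : List Int) (i : Int) (hi : 0 ≤ i) :
    ∀ (d : Nat) (a t : Int), i + 1 ≤ a → (cs.length : Int) - a ≤ d →
    (PySem.List.pyRange a (cs.length : Int) 1).foldl (fun t j =>
        if (PySem.List.pyRange (i + 1) j 1).all (fun k => PySem.List.pyGetD cs k 0 == 0) then
          t + PySem.List.pyGetD cs i 0 * PySem.List.pyGetD cs j 0
        else t) t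
      = t + (if (PySem.List.pyRange (i + 1) a 1).all (fun k => PySem.List.pyGetD cs k 0 == 0) then
               PySem.List.pyGetD cs i 0 * pvFirstNz (cs.drop a.toNat) else 0) := by
  intro d
  induction d with
  | zero =>
    intro a t ha hd
    rw [PySem.List.pyRange_one_eq_nil (by omega)]
    have hdr : cs.drop a.toNat = [] := List.drop_eq_nil_of_le (by omega)
    simp [hdr, pvFirstNz]
  | succ d ih =>
    intro a t ha hd
    by_cases hlt : a < (cs.length : Int)
    · have ha0 : 0 ≤ a := by omega
      have han : a.toNat < cs.length := by omega
      have hget : PySem.List.pyGetD cs a 0 = cs[a.toNat] :=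
        PySem.List.pyGetD_eq_getElem cs 0 ha0 hlt
      have hdrop : cs.drop a.toNat = cs[a.toNat] :: cs.drop (a.toNat + 1) :=
        List.drop_eq_getElem_cons han
      have htn : (a + 1).toNat = a.toNat + 1 := by omega
      have hsplit : PySem.List.pyRange (i + 1) (a + 1) 1
          = PySem.List.pyRange (i + 1) a 1 ++ [a] :=
        PySem.List.pyRange_one_succ_right ha
      rw [PySem.List.pyRange_one_cons hlt]
      simp only [List.foldl_cons]
      rw [ih (a + 1) _ (by omega) (by omega), hsplit, htn]
      simp only [List.all_append, List.all_cons, List.all_nil, Bool.and_true, hget, hdrop]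
      by_cases hall : (PySem.List.pyRange (i + 1) a 1).all
          (fun k => PySem.List.pyGetD cs k 0 == 0) = true
      · by_cases hz : cs[a.toNat] = 0
        · simp [hall, hz, pvFirstNz]
        · simp [hall, hz, pvFirstNz]
      · simp only [Bool.not_eq_true] at hall
        simp [hall]
    · rw [PySem.List.pyRange_one_eq_nil (by omega)]
      have hdr : cs.drop a.toNat = [] := List.drop_eq_nil_of_le (by omega)
      simp [hdr, pvFirstNz]

-- outer loop of A over cs
theorem pv_outer (cs : List Int) :
    ∀ (d : Nat) (a t : Int), 0 ≤ a → (cs.length : Int) - a ≤ d →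
    (PySem.List.pyRange a (cs.length : Int) 1).foldl (fun total i =>
      (PySem.List.pyRange (i + 1) (cs.length : Int) 1).foldl (fun total j =>
        if (PySem.List.pyRange (i + 1) j 1).all (fun k => PySem.List.pyGetD cs k 0 == 0) then
          total + PySem.List.pyGetD cs i 0 * PySem.List.pyGetD cs j 0
        else total) total) t
      = t + pvSum (cs.drop a.toNat) := by
  intro d
  induction d with
  | zero =>
    intro a t ha hd
    rw [PySem.List.pyRange_one_eq_nil (by omega)]
    have hdr : cs.drop a.toNat = [] := List.drop_eq_nil_of_le (by omega)
    simp [hdr, pvSum]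
  | succ d ih =>
    intro a t ha hd
    by_cases hlt : a < (cs.length : Int)
    · have ha0 : 0 ≤ a := by omega
      have han : a.toNat < cs.length := by omega
      have hget : PySem.List.pyGetD cs a 0 = cs[a.toNat] :=
        PySem.List.pyGetD_eq_getElem cs 0 ha0 hlt
      have hdrop : cs.drop a.toNat = cs[a.toNat] :: cs.drop (a.toNat + 1) :=
        List.drop_eq_getElem_cons han
      have htn : (a + 1).toNat = a.toNat + 1 := by omega
      rw [PySem.List.pyRange_one_cons hlt]
      simp only [List.foldl_cons]
      rw [pv_inner cs a ha0 cs.length (a + 1) t (by omega) (by omega)]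
      rw [PySem.List.pyRange_one_eq_nil (le_refl (a + 1))]
      simp only [List.all_nil, htn, hget]
      rw [ih (a + 1) _ (by omega) (by omega), htn]
      rw [hdrop]
      simp only [pvSum, if_true]
      ring
    · rw [PySem.List.pyRange_one_eq_nil (by omega)]
      have hdr : cs.drop a.toNat = [] := List.drop_eq_nil_of_le (by omega)
      simp [hdr, pvSum]

-- A's double loop over any row list equals pvSum of the per-row lengths
theorem pv_keyA (rows : List (List Int)) :
    (PySem.List.pyRange 0 (rows.length : Int) 1).foldl (fun total i =>
      (PySem.List.pyRange (i + 1) (rows.length : Int) 1).foldl (fun total j =>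
        if (PySem.List.pyRange (i + 1) j 1).all
             (fun k => (PySem.List.pyGetD rows k ([] : List Int)).isEmpty) then
          total + ((PySem.List.pyGetD rows i ([] : List Int)).length : Int)
                * ((PySem.List.pyGetD rows j ([] : List Int)).length : Int)
        else total) total) 0
    = pvSum (rows.map (fun r => ((r.length : Nat) : Int))) := by
  set cs := rows.map (fun r => ((r.length : Nat) : Int)) with hcs
  have hA1 : ∀ i : Int, ((PySem.List.pyGetD rows i ([] : List Int)).length : Int)
      = PySem.List.pyGetD cs i 0 := by
    intro i
    have h := PySem.List.pyGetD_map (fun r : List Int => ((r.length : Nat) : Int)) rows i []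
    simpa [hcs] using h.symm
  have hB1 : ∀ k : Int, (PySem.List.pyGetD rows k ([] : List Int)).isEmpty
      = (PySem.List.pyGetD cs k 0 == 0) := by
    intro k
    rw [← hA1 k]
    cases PySem.List.pyGetD rows k ([] : List Int) with
    | nil => simp
    | cons x xs => simp; omega
  have hlen : (rows.length : Int) = (cs.length : Int) := by simp [hcs]
  simp only [hA1, hB1, hlen]
  have h := pv_outer cs cs.length 0 0 (le_refl 0) (by omega)
  simpa using h

-- countP over enumerate counts the characters themselves
theorem pv_cpe (l : List Char) : ∀ (s : Int),
    List.countP (fun p : Int × Char => p.2 == '1') (PySem.List.enumerate l s) = l.count '1' := by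
  induction l with
  | nil => intro s; simp [PySem.List.enumerate_nil]
  | cons c t ih => intro s; simp [PySem.List.enumerate_cons, List.countP_cons, List.count_cons, ih]

-- the length of A's index list for a row is the number of '1' characters
theorem pv_len_build (l : List Char) :
    (((PySem.List.enumerate l).foldl
        (fun acc p => if p.2 == '1' then acc ++ [p.1] else acc) []).length : Int)
      = (l.count '1' : Int) := by
  rw [PySem.List.foldl_append_if]
  simp [← List.countP_eq_length_filter, pv_cpe]

-- B's fold over the strings is the counts fold over the mapped counts
theorem pv_altfold (l : List String) (st : Int × Int) :
    l.foldl (fun (st : Int × Int) row =>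
        let c : Int := (PySem.Str.count row "1" : Int)
        if c ≠ 0 then (st.1 + st.2 * c, c) else st) st
    = (l.map (fun row => ((row.toList.count '1' : Nat) : Int))).foldl
        (fun st c => if c ≠ 0 then (st.1 + st.2 * c, c) else st) st := by
  induction l generalizing st with
  | nil => rfl
  | cons r l ih =>
    rw [List.foldl_cons, List.map_cons, List.foldl_cons, ih]
    simp only [pv_cnt1]

-- ===== VERDICT (by name: the statement is the Claim_ definition above) =====
theorem laser_beams_spec : Claim_equal_laser_beams := by
  intro bank _
  unfold Spec_laser_beams laser_beams laser_beams_alt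
  have hmap : bank.map ((fun r : List Int => ((r.length : Nat) : Int)) ∘ (fun row =>
      (PySem.List.enumerate row.toList).foldl
        (fun acc p => if p.2 == '1' then acc ++ [p.1] else acc) []))
      = bank.map (fun row => ((row.toList.count '1' : Nat) : Int)) :=
    List.map_congr_left (fun row _ => pv_len_build row.toList)
  rw [pv_keyA, List.map_map, hmap, pv_altfold, pv_Bfold]
  simp
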